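-- pv_equiv track=rewrite | github.com/Apsidata-Solutions/sync-resume | src/cleanup.py | _direct_match
-- ===== SOURCE A (Python) =====
-- def _direct_match(input_text, target_list):
--     """Perform direct string matching against a list of targets"""
--     if not input_text:
--         return None
--
--     # First try exact match
--     cleaned_input = input_text.lower().strip()
--     for item in target_list:
--         if item.lower() == cleaned_input:
--             return item
--
--     # Try case-insensitive contains match
--     for item in target_list:
--         if item.lower() in cleaned_input:
--             return item
--
--     return None
-- ===== SOURCE B (Python) =====
-- def _direct_match(input_text, target_list):
--     """Single pass: exact match returns immediately; first contains-match is remembered."""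
--     if not input_text:
--         return None
--     cleaned_input = input_text.lower().strip()
--     first_contains = None
--     for item in target_list:
--         low = item.lower()
--         if low == cleaned_input:
--             return item
--         if first_contains is None and low in cleaned_input:
--             first_contains = item
--     return first_contains
-- ===== Notes on version B (the rewrite author's own statement) =====
-- stated objective: alternative
-- what changed: Replaces A's two sequential scans (one for exact, one for contains) by a single pass that short-circuits on exact match and remembers the first contains-match in an accumulator.
import Mathlib
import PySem

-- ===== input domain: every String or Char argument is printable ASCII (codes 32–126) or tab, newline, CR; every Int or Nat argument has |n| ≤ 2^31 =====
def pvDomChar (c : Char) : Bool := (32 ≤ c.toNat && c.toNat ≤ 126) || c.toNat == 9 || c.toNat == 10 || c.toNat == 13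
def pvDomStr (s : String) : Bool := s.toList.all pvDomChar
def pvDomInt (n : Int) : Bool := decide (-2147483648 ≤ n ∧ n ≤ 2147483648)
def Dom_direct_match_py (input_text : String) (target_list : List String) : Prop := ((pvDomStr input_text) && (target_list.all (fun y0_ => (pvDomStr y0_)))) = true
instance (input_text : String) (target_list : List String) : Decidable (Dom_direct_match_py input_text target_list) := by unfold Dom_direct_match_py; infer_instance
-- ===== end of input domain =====

-- B replaces A's two sequential scans with a single pass keeping the first contains-match in an accumulator (alternative decomposition, same cost).
-- ===== PORT A =====
-- Port of A: two sequential scans, first exact match then first contains-match.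
def dmExact (cleaned : String) : List String → Option String
  | [] => none
  | x :: xs => if PySem.Str.lower x = cleaned then some x else dmExact cleaned xs

def dmContains (cleaned : String) : List String → Option String
  | [] => none
  | x :: xs => if PySem.Str.isIn (PySem.Str.lower x) cleaned then some x else dmContains cleaned xs

def direct_match_py (input_text : String) (target_list : List String) : Option String :=
  if input_text = "" then none
  else
    let cleaned := PySem.Str.strip (PySem.Str.lower input_text)
    match dmExact cleaned target_list with
    | some r => some r
    | none => dmContains cleaned target_list

-- ===== PORT B =====
-- Port of B: one pass with an accumulator holding the first contains-match.
def dmGo (cleaned : String) : List String → Option String → Option String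
  | [], acc => acc
  | x :: xs, acc =>
    let low := PySem.Str.lower x
    if low = cleaned then some x
    else dmGo cleaned xs (if acc.isNone && PySem.Str.isIn low cleaned then some x else acc)

def direct_match_py_alt (input_text : String) (target_list : List String) : Option String :=
  if input_text = "" then none
  else
    let cleaned := PySem.Str.strip (PySem.Str.lower input_text)
    dmGo cleaned target_list none

-- ===== PRECONDITION & SPEC =====
def Spec_direct_match_py (input_text : String) (target_list : List String) (out : Option String) : Prop := out = direct_match_py_alt input_text target_list
instance (input_text : String) (target_list : List String) (out : Option String) : Decidable (Spec_direct_match_py input_text target_list out) := by unfold Spec_direct_match_py; infer_instance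

-- ===== CLAIM (what is proved, stated in full; the proofs are below) =====
def Claim_equal_direct_match_py : Prop := ∀ (input_text : String) (target_list : List String), Dom_direct_match_py input_text target_list → Spec_direct_match_py input_text target_list (direct_match_py input_text target_list)

-- ===== LEMMAS AND PROOFS =====
-- Loop invariant of B's single pass: it equals A's exact-scan, with the accumulator
-- taking priority over the remaining contains-scan.
theorem dmGo_eq (cleaned : String) (xs : List String) (acc : Option String) :
    dmGo cleaned xs acc =
      match dmExact cleaned xs with
      | some r => some r
      | none =>
        match acc with
        | some a => some a
        | none => dmContains cleaned xs := by
  induction xs generalizing acc with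
  | nil => cases acc <;> simp [dmGo, dmExact, dmContains]
  | cons x xs ih =>
    simp only [dmGo, dmExact, dmContains]
    by_cases hx : PySem.Str.lower x = cleaned
    · simp [hx]
    · simp only [if_neg hx]
      rw [ih]
      cases acc with
      | some a => simp
      | none =>
        by_cases hc : PySem.Chars.isIn (PySem.Chars.lower x.toList) cleaned.toList = true <;>
          simp [hc]

-- ===== VERDICT (by name: the statement is the Claim_ definition above) =====
theorem direct_match_py_spec : Claim_equal_direct_match_py := by
  intro input_text target_list _
  unfold Spec_direct_match_py direct_match_py direct_match_py_alt
  by_cases h : input_text = ""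
  · simp [h]
  · rw [if_neg h, if_neg h, dmGo_eq]
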